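-- pv_equiv track=rewrite | github.com/astronstar/LearningJournal-Code | SentenceParaphrase/Batch_TM.py | cal_sum
-- ===== SOURCE A (Python) =====
-- def cal_sum(the_list):
-- 	"""
-- 	计算列表前n项和
-- 	:param the_list: 待处理列表
-- 	:return: 列表求和结果，默认第一项为0
-- 	"""
-- 	list_len = [len(l) for l in the_list]
--
-- 	list_sum = []
--
-- 	num = 0
-- 	list_sum.append(num)
-- 	for i in range(len(list_len)):
-- 		num += list_len[i]
-- 		list_sum.append(num)
--
-- 	return list_sum
-- ===== SOURCE B (Python) =====
-- def cal_sum(the_list):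
-- 	"""
-- 	计算列表前n项和
-- 	:param the_list: 待处理列表
-- 	:return: 列表求和结果，默认第一项为0
-- 	"""
-- 	return [sum(len(l) for l in the_list[:i]) for i in range(len(the_list) + 1)]
-- ===== Notes on version B (the rewrite author's own statement) =====
-- stated objective: simpler
-- what changed: Replaced the running-accumulator loop that appends into a result list with a single comprehension that recomputes each prefix total by re-summing the sublist lengths up to index i.
import Mathlib
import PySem

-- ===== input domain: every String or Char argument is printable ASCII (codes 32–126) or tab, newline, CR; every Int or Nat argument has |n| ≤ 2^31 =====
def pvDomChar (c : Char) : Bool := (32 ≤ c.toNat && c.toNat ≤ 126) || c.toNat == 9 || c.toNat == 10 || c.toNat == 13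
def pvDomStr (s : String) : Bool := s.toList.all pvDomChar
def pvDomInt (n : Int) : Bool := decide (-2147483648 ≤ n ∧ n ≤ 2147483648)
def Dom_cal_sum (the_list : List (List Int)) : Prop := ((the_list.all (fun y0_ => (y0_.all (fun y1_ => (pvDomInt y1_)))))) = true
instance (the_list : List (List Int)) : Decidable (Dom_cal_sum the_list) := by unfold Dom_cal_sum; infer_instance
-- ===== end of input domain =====

-- ===== PORT A =====
-- B is a different decomposition (re-summing comprehension instead of a running accumulator); not faster.
def cal_sum (the_list : List (List Int)) : List Int :=
  let list_len : List Int := the_list.map (fun l => (l.length : Int))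
  let st :=
    (PySem.List.pyRange 0 (list_len.length : Int) 1).foldl
      (fun (st : Int × List Int) i =>
        let num := st.1 + PySem.List.pyGetD list_len i 0
        (num, st.2 ++ [num]))
      (0, [0])
  st.2

-- ===== PORT B =====
def cal_sum_alt (the_list : List (List Int)) : List Int :=
  (List.range (the_list.length + 1)).map
    (fun (i : Nat) =>
      ((PySem.List.slice the_list none (some (i : Int))).map
        (fun l => (l.length : Int))).sum)

-- ===== PRECONDITION & SPEC =====
def Spec_cal_sum (the_list : List (List Int)) (out : List Int) : Prop := out = cal_sum_alt the_list
instance (the_list : List (List Int)) (out : List Int) : Decidable (Spec_cal_sum the_list out) := by unfold Spec_cal_sum; infer_instance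

-- ===== CLAIM (what is proved, stated in full; the proofs are below) =====
def Claim_equal_cal_sum : Prop := ∀ (the_list : List (List Int)), Dom_cal_sum the_list → Spec_cal_sum the_list (cal_sum the_list)

-- ===== LEMMAS AND PROOFS =====

-- A's accumulator loop produces the running prefix sums appended to the initial list.
theorem calsum_loop (xs : List Int) (s : Int) (acc : List Int) :
    (xs.foldl (fun (st : Int × List Int) x => (st.1 + x, st.2 ++ [st.1 + x])) (s, acc)).2
      = acc ++ (List.range xs.length).map (fun i => s + (xs.take (i + 1)).sum) := by
  induction xs generalizing s acc with
  | nil => simp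
  | cons x xs ih =>
      simp only [List.foldl_cons, ih, List.length_cons, List.range_succ_eq_map,
        List.map_cons, List.map_map]
      simp [Function.comp, add_assoc]

-- ===== VERDICT (by name: the statement is the Claim_ definition above) =====
theorem cal_sum_spec : Claim_equal_cal_sum := by
  intro the_list _
  show cal_sum the_list = cal_sum_alt the_list
  dsimp only [cal_sum, cal_sum_alt]
  rw [show (((the_list.map fun l => ((l.length : Int))).length : Int))
        = PySem.List.len (the_list.map fun l => ((l.length : Int))) by
      simp [PySem.List.len]]
  rw [PySem.List.foldl_pyRange_pyGetD (the_list.map fun l => ((l.length : Int))) 0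
      (fun (st : Int × List Int) x => (st.1 + x, st.2 ++ [st.1 + x])) (0, [0])
      (le_refl 0)]
  rw [calsum_loop]
  simp [PySem.List.slice_to_natCast, List.range_succ_eq_map, Function.comp,
    List.map_take]
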